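-- pv_equiv track=rewrite | github.com/architrahul/Hilbert-Basis-Algorithm | my_testing/pipeline_covering.py | greedy_t_covering
-- ===== SOURCE A (Python) =====
-- from itertools import combinations
--
-- def greedy_t_covering(n, k, t):
--     """
--     Generate a t-covering design C(n, k, t) using a greedy algorithm.
--
--     Returns a list of k-subsets such that every t-subset is covered by at least one k-subset.
--
--     Args:
--         n: Total number of elements (monomers)
--         k: Size of each subset
--         t: Coverage parameter (every t-subset must be covered)
--
--     Returns:
--         List of k-subsets (each subset is a tuple of indices)
--     """
--     # Generate all t-subsets that need to be covered
--     all_t_subsets = set(combinations(range(n), t))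
--     uncovered = all_t_subsets.copy()
--
--     # Selected k-subsets
--     covering_design = []
--
--     # Greedy algorithm: repeatedly select the k-subset that covers the most uncovered t-subsets
--     while uncovered:
--         best_k_subset = None
--         best_coverage_count = 0
--
--         # Try all possible k-subsets
--         for k_subset in combinations(range(n), k):
--             # Count how many uncovered t-subsets this k-subset covers
--             covered_by_this = 0
--             for t_subset in uncovered:
--                 # Check if t_subset is contained in k_subset
--                 if set(t_subset).issubset(set(k_subset)):
--                     covered_by_this += 1
--
--             if covered_by_this > best_coverage_count:
--                 best_coverage_count = covered_by_this
--                 best_k_subset = k_subset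
--
--         # Add the best k-subset to our design
--         if best_k_subset is None:
--             break
--
--         covering_design.append(best_k_subset)
--
--         # Remove all t-subsets covered by this k-subset
--         newly_covered = set()
--         for t_subset in uncovered:
--             if set(t_subset).issubset(set(best_k_subset)):
--                 newly_covered.add(t_subset)
--
--         uncovered -= newly_covered
--
--     return covering_design
-- ===== SOURCE B (Python) =====
-- from itertools import combinations
--
-- def _member(sorted_list, x):
--     """Binary search (bisect_left) membership test in a lex-sorted list."""
--     lo, hi = 0, len(sorted_list)
--     while lo < hi:
--         mid = (lo + hi) // 2
--         if sorted_list[mid] < x: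
--             lo = mid + 1
--         else:
--             hi = mid
--     return lo < len(sorted_list) and sorted_list[lo] == x
--
-- def greedy_t_covering(n, k, t):
--     """Greedy t-covering design, same greedy choices as the original.
--
--     The uncovered t-subsets are kept as a lex-sorted list (combinations emits
--     them in lex order, and filtering preserves it).  Each candidate k-subset's
--     coverage is counted by enumerating its own C(k,t) t-subsets and binary
--     searching the uncovered list, instead of scanning every uncovered t-subset
--     with a per-pair subset test; removal filters the uncovered list against the
--     best k-subset's own t-subsets the same way."""
--     uncovered = list(combinations(range(n), t))
--     covering_design = []
--     while uncovered:
--         best_k_subset = None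
--         best_coverage_count = 0
--         for k_subset in combinations(range(n), k):
--             c = 0
--             for t_subset in combinations(k_subset, t):
--                 if _member(uncovered, t_subset):
--                     c += 1
--             if c > best_coverage_count:
--                 best_coverage_count = c
--                 best_k_subset = k_subset
--         if best_k_subset is None:
--             break
--         covering_design.append(best_k_subset)
--         removed = list(combinations(best_k_subset, t))
--         uncovered = [ts for ts in uncovered if not _member(removed, ts)]
--     return covering_design
-- ===== Notes on version B (the rewrite author's own statement) =====
-- stated objective: alternative
-- what changed: B replaces A's hash-set of uncovered t-subsets and its inner scan of every uncovered t-subset with a per-pair subset test by a lex-sorted uncovered list: each candidate k-subset's coverage is counted by enumerating its own C(k,t) t-subsets and binary-searching the sorted list, and removal filters the list against the chosen k-subset's own t-subsets the same way.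
import Mathlib
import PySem

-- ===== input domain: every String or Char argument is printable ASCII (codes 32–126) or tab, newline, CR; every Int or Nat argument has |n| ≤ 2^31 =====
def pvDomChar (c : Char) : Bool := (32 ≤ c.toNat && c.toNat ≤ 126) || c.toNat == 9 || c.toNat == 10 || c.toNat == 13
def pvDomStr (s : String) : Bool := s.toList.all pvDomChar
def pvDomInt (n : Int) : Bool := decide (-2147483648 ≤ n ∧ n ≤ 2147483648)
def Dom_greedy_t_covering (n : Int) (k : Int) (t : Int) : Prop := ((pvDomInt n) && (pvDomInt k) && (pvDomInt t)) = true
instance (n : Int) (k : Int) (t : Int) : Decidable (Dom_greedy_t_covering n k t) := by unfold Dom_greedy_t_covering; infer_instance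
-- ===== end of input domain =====

-- B keeps the uncovered t-subsets as a lex-sorted list and counts a candidate's coverage by
-- enumerating its own C(k,t) t-subsets with binary-search membership, instead of A's scan of
-- every uncovered t-subset with a per-pair subset test.

-- itertools.combinations(xs, r) (both Pythons): equals the prelude's
-- PySem.List.combinations (pvComb_eq below); the explicit r > len(xs) early exit mirrors
-- CPython's 'if r > n: return' and keeps evaluation linear there.
def pvComb (xs : List Int) (r : Nat) : List (List Int) :=
  if xs.length < r then []
  else match xs, r with
    | _, 0 => [[]]
    | [], _ + 1 => []
    | x :: xs', r' + 1 => ((pvComb xs' r').map (x :: ·)) ++ pvComb xs' (r' + 1)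
termination_by xs.length
decreasing_by all_goals simp

-- ===== PORT A =====
-- A's inner 'for t_subset in uncovered' counting loop ('set(t).issubset(set(k))' = all elements in k)
def pvCountA (unc : List (List Int)) (ks : List Int) : Int :=
  unc.foldl (fun c ts => if ts.all (fun x => ks.contains x) then c + 1 else c) 0

-- A's 'for k_subset in combinations(range(n), k)' best-candidate loop
def pvBestA (kss : List (List Int)) (unc : List (List Int)) : Option (List Int) × Int :=
  kss.foldl (fun best ks =>
    let c := pvCountA unc ks
    if best.2 < c then (some ks, c) else best) (none, 0)

-- generic fact about the best-candidate fold, needed for termination of both loops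
theorem pv_best_inv (f : List Int → Int) (kss : List (List Int)) :
    ∀ init : Option (List Int) × Int,
      (kss.foldl (fun best ks => let c := f ks; if best.2 < c then (some ks, c) else best) init
          = init) ∨
      ∃ b ∈ kss,
        kss.foldl (fun best ks => let c := f ks; if best.2 < c then (some ks, c) else best) init
            = (some b, f b) ∧ init.2 < f b := by
  induction kss with
  | nil => intro init; left; rfl
  | cons ks rest ih =>
    intro init
    simp only [List.foldl_cons]
    by_cases h : init.2 < f ks
    · simp only [h, if_pos]
      rcases ih (some ks, f ks) with heq | ⟨b, hb, heq, hlt⟩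
      · exact Or.inr ⟨ks, List.mem_cons_self, heq, h⟩
      · exact Or.inr ⟨b, List.mem_cons_of_mem _ hb, heq, lt_trans h hlt⟩
    · simp only [h, if_false]
      rcases ih init with heq | ⟨b, hb, heq, hlt⟩
      · exact Or.inl heq
      · exact Or.inr ⟨b, List.mem_cons_of_mem _ hb, heq, hlt⟩

theorem pv_bestA_some {kss unc : List (List Int)} {b : List Int} {c : Int}
    (h : pvBestA kss unc = (some b, c)) :
    b ∈ kss ∧ c = pvCountA unc b ∧ 0 < pvCountA unc b := by
  rcases pv_best_inv (pvCountA unc) kss (none, 0) with heq | ⟨b', hb', heq, hlt⟩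
  · rw [pvBestA] at h; rw [heq] at h; cases h
  · rw [pvBestA] at h; rw [heq] at h
    obtain ⟨hb, hc⟩ := Prod.mk.injEq .. ▸ h
    cases hb; cases hc
    exact ⟨hb', rfl, hlt⟩

theorem pv_filter_length_lt {α : Type} {p : α → Bool} {l : List α} {x : α}
    (hx : x ∈ l) (hpx : p x = false) : (l.filter p).length < l.length := by
  induction l with
  | nil => cases hx
  | cons a l ih =>
    rcases List.mem_cons.mp hx with rfl | hxl
    · simp only [List.filter_cons, hpx, Bool.false_eq_true, if_false]
      exact Nat.lt_succ_of_le (List.length_filter_le _ _)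
    · by_cases hpa : p a = true
      · simpa [List.filter_cons, hpa] using Nat.succ_lt_succ (ih hxl)
      · simp only [List.filter_cons, hpa, List.length_cons]
        exact Nat.lt_succ_of_lt (ih hxl)

theorem pv_countA_pos {unc : List (List Int)} {b : List Int} (h : 0 < pvCountA unc b) :
    ∃ ts ∈ unc, ts.all (fun x => b.contains x) = true := by
  rw [pvCountA, PySem.List.foldl_count_if, zero_add] at h
  exact List.countP_pos_iff.mp (by exact_mod_cast h)

-- A's while loop.  'newly_covered' is exactly the covered subset of 'uncovered' and
-- 'uncovered -= newly_covered' removes it; ported as the single filter keeping the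
-- uncovered t-subsets NOT covered by the chosen k-subset (same value, and a Python set's
-- internal order is not observable).
def pvLoopA (kss : List (List Int)) (acc unc : List (List Int)) : List (List Int) :=
  if unc = [] then acc
  else
    match hb : pvBestA kss unc with
    | (none, _) => acc
    | (some b, _) =>
      pvLoopA kss (acc ++ [b]) (unc.filter (fun ts => !(ts.all (fun x => b.contains x))))
termination_by unc.length
decreasing_by
  simp
  obtain ⟨_, _, hpos⟩ := pv_bestA_some hb
  obtain ⟨ts, hts, hcov⟩ := pv_countA_pos hpos
  have hcov' : (ts.all fun x => decide (x ∈ b)) = true := by simpa using hcov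
  have hmem2 : (⟨ts, hts⟩ : {x // x ∈ unc}) ∈ unc.attach := List.mem_attach _ _
  have hp : (fun (x : {x // x ∈ unc}) => !(x.1.all fun y => decide (y ∈ b))) ⟨ts, hts⟩
      = false := by simp [hcov']
  have h := pv_filter_length_lt (p := fun (x : {x // x ∈ unc}) => !(x.1.all fun y => decide (y ∈ b))) hmem2 hp
  simpa using h

-- 'set(combinations(range(n), t))': combinations of range(n) are pairwise distinct
-- (they are strictly lex-sorted, pv_comb_sorted below), so set() holds exactly this list of
-- distinct elements, in this order under the PySem.Set representation (first occurrences).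
def greedy_t_covering (n : Int) (k : Int) (t : Int) : List (List Int) :=
  pvLoopA (pvComb (PySem.List.pyRange 0 n) k.toNat) []
    (pvComb (PySem.List.pyRange 0 n) t.toNat)

-- ===== PORT B =====
-- B's hand-written bisect_left loop; a Python list has O(1) indexing, hence Array
def pvBisect (arr : Array (List Int)) (x : List Int) (lo hi : Nat) : Nat :=
  if hlt : lo < hi then
    let mid := (lo + hi) / 2
    if hm : mid < arr.size then
      if arr[mid] < x then pvBisect arr x (mid + 1) hi
      else pvBisect arr x lo mid
    else lo
  else lo
termination_by hi - lo
decreasing_by all_goals omega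

-- B's '_member(sorted_list, x)'
def pvMember (arr : Array (List Int)) (x : List Int) : Bool :=
  let i := pvBisect arr x 0 arr.size
  if h : i < arr.size then arr[i] == x else false

-- B's inner 'for t_subset in combinations(k_subset, t)' counting loop
def pvCountB (uncA : Array (List Int)) (tss : List (List Int)) : Int :=
  tss.foldl (fun c ts => if pvMember uncA ts then c + 1 else c) 0

def pvBestB (kss : List (List Int)) (tn : Nat) (unc : List (List Int)) :
    Option (List Int) × Int :=
  let uncA := unc.toArray
  kss.foldl (fun best ks =>
    let c := pvCountB uncA (pvComb ks tn)
    if best.2 < c then (some ks, c) else best) (none, 0)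

-- B's while loop, with an explicit fuel bound making the recursion structural; the fuel
-- only totalises the definition (each round strictly shrinks 'uncovered', and the loop is
-- entered with fuel = |uncovered| + 1, proved sufficient in pv_loop_eq below).
def pvLoopB (kss : List (List Int)) (tn : Nat) (fuel : Nat) (acc unc : List (List Int)) :
    List (List Int) :=
  match fuel with
  | 0 => acc
  | fuel + 1 =>
    if unc = [] then acc
    else
      match pvBestB kss tn unc with
      | (none, _) => acc
      | (some b, _) =>
        let remA := (pvComb b tn).toArray
        pvLoopB kss tn fuel (acc ++ [b]) (unc.filter (fun ts => !pvMember remA ts))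

def greedy_t_covering_alt (n : Int) (k : Int) (t : Int) : List (List Int) :=
  let unc0 := pvComb (PySem.List.pyRange 0 n) t.toNat
  pvLoopB (pvComb (PySem.List.pyRange 0 n) k.toNat) t.toNat (unc0.length + 1) [] unc0

-- ===== PRECONDITION & SPEC =====
-- Pre_ excludes exactly the inputs where Python raises ValueError from a negative
-- combinations size: t < 0, or k < 0 reached with a nonempty set of t-subsets to cover
-- (k < 0 is harmless when 1 ≤ t and n < t: there are no t-subsets and the loop never runs).
def Pre_greedy_t_covering (n : Int) (k : Int) (t : Int) : Prop :=
  0 ≤ t ∧ (0 ≤ k ∨ (1 ≤ t ∧ n < t))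
instance (n : Int) (k : Int) (t : Int) : Decidable (Pre_greedy_t_covering n k t) := by
  unfold Pre_greedy_t_covering; infer_instance

def pvWitness_greedy_t_covering : Int × Int × Int := (4, 2, 2)

def Spec_greedy_t_covering (n : Int) (k : Int) (t : Int) (out : List (List Int)) : Prop :=
  out = greedy_t_covering_alt n k t
instance (n : Int) (k : Int) (t : Int) (out : List (List Int)) :
    Decidable (Spec_greedy_t_covering n k t out) := by unfold Spec_greedy_t_covering; infer_instance

-- ===== CLAIM (what is proved, stated in full; the proofs are below) =====
def Claim_equal_greedy_t_covering : Prop :=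
  ∀ (n : Int) (k : Int) (t : Int), Dom_greedy_t_covering n k t →
    Pre_greedy_t_covering n k t → Spec_greedy_t_covering n k t (greedy_t_covering n k t)

-- ===== LEMMAS AND PROOFS =====

-- invariant of the bisect loop on a lex-sorted array
theorem pv_bisect_inv (arr : Array (List Int)) (x : List Int)
    (hs : arr.toList.Pairwise (· < ·)) :
    ∀ (d lo hi : Nat), hi - lo ≤ d → hi ≤ arr.size → lo ≤ hi →
      (∀ j (_ : j < arr.size), j < lo → arr[j] < x) →
      (∀ j (_ : j < arr.size), hi ≤ j → ¬ arr[j] < x) →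
      lo ≤ pvBisect arr x lo hi ∧ pvBisect arr x lo hi ≤ hi ∧
      (∀ j (_ : j < arr.size), j < pvBisect arr x lo hi → arr[j] < x) ∧
      (∀ j (_ : j < arr.size), pvBisect arr x lo hi ≤ j → ¬ arr[j] < x) := by
  have hsorted : ∀ (i j : Nat) (_ : i < arr.size) (_ : j < arr.size), i < j →
      arr[i] < arr[j] := by
    intro i j hi hj hij
    have := List.pairwise_iff_getElem.mp hs i j (by simpa using hi) (by simpa using hj) hij
    simpa [Array.getElem_toList] using this
  intro d
  induction d with
  | zero =>
    intro lo hi hd hhi hlohi hlow hhigh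
    have : ¬ lo < hi := by omega
    rw [pvBisect, dif_neg this]
    exact ⟨le_refl _, hlohi, hlow, fun j hj hij => hhigh j hj (by omega)⟩
  | succ d ih =>
    intro lo hi hd hhi hlohi hlow hhigh
    by_cases hlt : lo < hi
    · rw [pvBisect, dif_pos hlt]
      have hm : (lo + hi) / 2 < arr.size := by omega
      rw [dif_pos hm]
      by_cases hcmp : arr[(lo + hi) / 2] < x
      · rw [if_pos hcmp]
        refine (ih ((lo + hi) / 2 + 1) hi (by omega) hhi (by omega) ?_ hhigh).imp
          (fun h => by omega) (fun h => h)
        intro j hj hjlt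
        rcases Nat.lt_or_ge j lo with hjlo | hjlo
        · exact hlow j hj hjlo
        · rcases Nat.lt_or_ge j ((lo + hi) / 2) with hjm | hjm
          · exact lt_trans (hsorted j _ hj hm hjm) hcmp
          · have : j = (lo + hi) / 2 := by omega
            subst this; exact hcmp
      · rw [if_neg hcmp]
        refine (ih lo ((lo + hi) / 2) (by omega) (by omega) (by omega) hlow ?_).imp
          (fun h => h) (fun h => ⟨by omega, h.2⟩)
        intro j hj hjm hjcmp
        rcases Nat.lt_or_ge ((lo + hi) / 2) j with hmj | hmj
        · exact hcmp (lt_trans (hsorted _ j hm hj hmj) hjcmp)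
        · have : j = (lo + hi) / 2 := by omega
          subst this; exact hcmp hjcmp
    · rw [pvBisect, dif_neg hlt]
      exact ⟨le_refl _, hlohi, hlow, fun j hj hij => hhigh j hj (by omega)⟩

-- B's binary-search membership test agrees with plain membership on a lex-sorted list
theorem pv_member_eq {l : List (List Int)} (hs : l.Pairwise (· < ·)) (x : List Int) :
    pvMember l.toArray x = l.contains x := by
  have hsz : l.toArray.size = l.length := by simp
  obtain ⟨hlo, hhi, hlt, hge⟩ := pv_bisect_inv l.toArray x (by simpa using hs)
    l.toArray.size 0 l.toArray.size le_rfl le_rfl (Nat.zero_le _)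
    (fun j _ hj => absurd hj (Nat.not_lt_zero j)) (fun j hj hij => absurd hj (by omega))
  rw [pvMember]
  set i := pvBisect l.toArray x 0 l.toArray.size with hi
  by_cases hmem : x ∈ l
  · obtain ⟨j, hj, hxj⟩ := List.mem_iff_getElem.mp hmem
    have hja : l.toArray[j]'(by omega) = x := by
      rw [List.getElem_toArray]; exact hxj
    have hij : i ≤ j := by
      by_contra hc
      have h2 := hlt j (by omega) (by omega)
      rw [hja] at h2
      exact lt_irrefl x h2
    have hisz : i < l.toArray.size := by omega
    have hxle : x ≤ l.toArray[i] := not_lt.mp (hge i hisz le_rfl)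
    have hieq : l.toArray[i] = x := by
      rcases Nat.lt_or_ge i j with hij' | hij'
      · have := List.pairwise_iff_getElem.mp hs i j (by omega) (by omega) hij'
        have h2 : l.toArray[i] < x := by
          rw [← hja]
          simpa [List.getElem_toArray] using this
        exact absurd (lt_of_le_of_lt hxle h2) (lt_irrefl x)
      · have : i = j := by omega
        subst this; exact hja
    rw [dif_pos hisz]
    simp [hieq, hmem]
  · have hcontains : l.contains x = false := by
      rw [← Bool.not_eq_true, List.contains_iff_mem]; exact hmem
    rw [hcontains]
    by_cases hisz : i < l.toArray.size
    · rw [dif_pos hisz, beq_eq_false_iff_ne]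
      intro heq
      apply hmem
      rw [← heq, List.getElem_toArray]
      exact List.getElem_mem (by omega)
    · rw [dif_neg hisz]

-- elements of combinations of a strictly increasing list are strictly increasing, and the
-- list of combinations itself is strictly lex-sorted (hence duplicate-free)
theorem pv_comb_sorted :
    ∀ (xs : List Int) (r : Nat), xs.Pairwise (· < ·) →
      (PySem.List.combinations xs r).Pairwise (· < ·) := by
  intro xs
  induction xs with
  | nil =>
    intro r _
    cases r with
    | zero => simp [PySem.List.combinations_zero]
    | succ r => simp [PySem.List.combinations_nil_succ]
  | cons x xs ih =>
    intro r hnd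
    have hx : ∀ y ∈ xs, x < y := (List.pairwise_cons.mp hnd).1
    have hxs : xs.Pairwise (· < ·) := (List.pairwise_cons.mp hnd).2
    cases r with
    | zero => simp [PySem.List.combinations_zero]
    | succ r =>
      rw [PySem.List.combinations_cons_succ]
      rw [List.pairwise_append]
      refine ⟨List.pairwise_map.mpr ((ih r hxs).imp ?_), ih (r+1) hxs, ?_⟩
      · intro a b hab
        exact List.cons_lt_cons_iff.mpr (Or.inr ⟨rfl, hab⟩)
      · intro a ha b hb
        obtain ⟨a', _, rfl⟩ := List.mem_map.mp ha
        obtain ⟨hbs, hbl⟩ := (PySem.List.mem_combinations_iff _ _ _).mp hb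
        cases b with
        | nil => simp at hbl
        | cons y b' =>
          have hy : y ∈ xs := hbs.subset List.mem_cons_self
          exact List.cons_lt_cons_iff.mpr (Or.inl (hx y hy))

theorem pv_comb_mem_sorted {xs : List Int} {r : Nat} {c : List Int}
    (hxs : xs.Pairwise (· < ·)) (hc : c ∈ PySem.List.combinations xs r) :
    c.Pairwise (· < ·) :=
  List.Pairwise.sublist ((PySem.List.mem_combinations_iff _ _ _).mp hc).1 hxs


@[simp]
theorem pvComb_eq : ∀ (xs : List Int) (r : Nat), pvComb xs r = PySem.List.combinations xs r := by
  intro xs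
  induction xs with
  | nil =>
    intro r
    cases r with
    | zero => rw [pvComb.eq_def]; simp [PySem.List.combinations_zero]
    | succ r => rw [pvComb.eq_def]; simp [PySem.List.combinations_nil_succ]
  | cons x xs ih =>
    intro r
    cases r with
    | zero => rw [pvComb.eq_def]; simp [PySem.List.combinations_zero]
    | succ r =>
      rw [pvComb.eq_def]
      by_cases h : (x :: xs).length < r + 1
      · rw [if_pos h, eq_comm]
        exact PySem.List.combinations_eq_nil_of_length_lt _ h
      · rw [if_neg h]
        show ((pvComb xs r).map (x :: ·)) ++ pvComb xs (r + 1) = _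
        rw [PySem.List.combinations_cons_succ, ih, ih]

-- a strictly increasing list of members of a strictly increasing list is a sublist of it
theorem pv_sublist_of_sorted :
    ∀ (ks ts : List Int), ts.Pairwise (· < ·) → ks.Pairwise (· < ·) →
      (∀ x ∈ ts, x ∈ ks) → ts.Sublist ks := by
  intro ks
  induction ks with
  | nil =>
    intro ts _ _ hsub
    cases ts with
    | nil => exact List.Sublist.refl _
    | cons a ts' => exact absurd (hsub a List.mem_cons_self) (List.not_mem_nil)
  | cons b ks' ih =>
    intro ts hts hks hsub
    cases ts with
    | nil => exact List.nil_sublist _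
    | cons a ts' =>
      have hats := List.pairwise_cons.mp hts
      have hbks := List.pairwise_cons.mp hks
      rcases List.mem_cons.mp (hsub a List.mem_cons_self) with rfl | haks'
      · refine List.Sublist.cons₂ a (ih ts' hats.2 hbks.2 ?_)
        intro y hy
        rcases List.mem_cons.mp (hsub y (List.mem_cons_of_mem _ hy)) with rfl | hyk
        · exact absurd (hats.1 y hy) (lt_irrefl y)
        · exact hyk
      · have hba : b < a := hbks.1 a haks'
        refine List.Sublist.cons b (ih (a :: ts') hts hbks.2 ?_)
        intro y hy
        have hby : b < y := by
          rcases List.mem_cons.mp hy with rfl | hy'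
          · exact hba
          · exact lt_trans hba (hats.1 y hy')
        rcases List.mem_cons.mp (hsub y hy) with rfl | hyk
        · exact absurd hby (lt_irrefl y)
        · exact hyk

-- "ts covered by ks" (A's test) coincides with "ts is one of ks's own t-subsets" (B's view)
theorem pv_cov_iff {ts ks : List Int} {tn : Nat}
    (hts : ts.Pairwise (· < ·)) (hks : ks.Pairwise (· < ·)) (hlen : ts.length = tn) :
    (ts.all (fun x => ks.contains x) = true) ↔ ts ∈ PySem.List.combinations ks tn := by
  rw [PySem.List.mem_combinations_iff]
  constructor
  · intro hall
    refine ⟨pv_sublist_of_sorted ks ts hts hks ?_, hlen⟩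
    intro x hx
    exact List.contains_iff_mem.mp (List.all_eq_true.mp hall x hx)
  · rintro ⟨hsl, _⟩
    exact List.all_eq_true.mpr fun x hx => List.contains_iff_mem.mpr (hsl.subset hx)

theorem pv_count_eq {unc : List (List Int)} {ks : List Int} {tn : Nat}
    (hs : unc.Pairwise (· < ·))
    (hmem : ∀ ts ∈ unc, ts.Pairwise (· < ·) ∧ ts.length = tn)
    (hks : ks.Pairwise (· < ·)) :
    pvCountA unc ks = pvCountB unc.toArray (PySem.List.combinations ks tn) := by
  rw [pvCountA, pvCountB]
  rw [PySem.List.foldl_congr_mem (PySem.List.combinations ks tn)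
    (fun c ts => if pvMember unc.toArray ts then c + 1 else c)
    (fun c ts => if unc.contains ts then c + 1 else c) 0
    (fun acc ts _ => by simp only [pv_member_eq hs])]
  rw [PySem.List.foldl_count_if, PySem.List.foldl_count_if, zero_add, zero_add]
  have hnd : unc.Nodup := hs.imp ne_of_lt
  have hcnd : (PySem.List.combinations ks tn).Nodup :=
    (pv_comb_sorted ks tn hks).imp ne_of_lt
  have h1 : (unc.filter (fun ts => ts.all (fun x => ks.contains x))).Perm
      ((PySem.List.combinations ks tn).filter (fun ts => unc.contains ts)) := by
    refine (List.perm_ext_iff_of_nodup (hnd.filter _) (hcnd.filter _)).mpr ?_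
    intro ts
    simp only [List.mem_filter]
    constructor
    · rintro ⟨htu, hcov⟩
      exact ⟨(pv_cov_iff (hmem ts htu).1 hks (hmem ts htu).2).mp hcov,
        List.contains_iff_mem.mpr htu⟩
    · rintro ⟨htc, htu⟩
      have htu' := List.contains_iff_mem.mp htu
      exact ⟨htu', (pv_cov_iff (hmem ts htu').1 hks (hmem ts htu').2).mpr htc⟩
  rw [List.countP_eq_length_filter, List.countP_eq_length_filter, h1.length_eq]

theorem pv_best_eq {kss unc : List (List Int)} {tn : Nat}
    (hs : unc.Pairwise (· < ·))
    (hmem : ∀ ts ∈ unc, ts.Pairwise (· < ·) ∧ ts.length = tn)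
    (hkss : ∀ ks ∈ kss, ks.Pairwise (· < ·)) :
    pvBestA kss unc = pvBestB kss tn unc := by
  rw [pvBestA, pvBestB]
  simp only [pvComb_eq]
  refine PySem.List.foldl_congr_mem _ _ _ _ ?_
  intro acc ks hks
  simp only [pv_count_eq hs hmem (hkss ks hks)]

theorem pv_filter_eq {unc : List (List Int)} {b : List Int} {tn : Nat}
    (hmem : ∀ ts ∈ unc, ts.Pairwise (· < ·) ∧ ts.length = tn)
    (hb : b.Pairwise (· < ·)) :
    unc.filter (fun ts => !(ts.all (fun x => b.contains x)))
      = unc.filter (fun ts => !pvMember (PySem.List.combinations b tn).toArray ts) := by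
  refine List.filter_congr ?_
  intro ts hts
  rw [pv_member_eq (pv_comb_sorted b tn hb) ts]
  have : (ts.all (fun x => b.contains x)) = (PySem.List.combinations b tn).contains ts := by
    rw [Bool.eq_iff_iff, List.contains_iff_mem]
    exact pv_cov_iff (hmem ts hts).1 hb (hmem ts hts).2
  rw [this]

theorem pv_loop_eq (kss : List (List Int)) (tn : Nat)
    (hkss : ∀ ks ∈ kss, ks.Pairwise (· < ·)) :
    ∀ (fuel : Nat) (unc : List (List Int)), unc.length < fuel →
      unc.Pairwise (· < ·) →
      (∀ ts ∈ unc, ts.Pairwise (· < ·) ∧ ts.length = tn) → ∀ acc,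
      pvLoopA kss acc unc = pvLoopB kss tn fuel acc unc := by
  intro fuel
  induction fuel with
  | zero => intro unc hlen _ _ _; omega
  | succ fuel ih =>
    intro unc hlen hs hmem acc
    by_cases hne : unc = []
    · subst hne; rw [pvLoopA.eq_def]; simp [pvLoopB]
    · rw [pvLoopA.eq_def]
      simp only [pvLoopB]
      rw [if_neg hne, if_neg hne, ← pv_best_eq hs hmem hkss]
      split
      · next c hno => simp only [hno]
      · next b c h1 =>
          simp only [h1, pvComb_eq]
          rw [← pv_filter_eq hmem (hkss b (pv_bestA_some h1).1)]
          set unc' := unc.filter (fun ts => !(ts.all (fun x => b.contains x))) with hunc'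
          have hsub : ∀ ts ∈ unc', ts ∈ unc := fun ts hts => List.mem_of_mem_filter hts
          have hlt : unc'.length < unc.length := by
            obtain ⟨hbmem, _, hpos⟩ := pv_bestA_some h1
            obtain ⟨ts, hts, hcov⟩ := pv_countA_pos hpos
            refine pv_filter_length_lt hts ?_
            show (!(ts.all (fun x => b.contains x))) = false
            rw [hcov]
            rfl
          exact ih unc' (by omega) (hs.filter _) (fun ts hts => hmem ts (hsub ts hts)) _

-- ===== VERDICT (by name: the statement is the Claim_ definition above) =====
theorem greedy_t_covering_spec : Claim_equal_greedy_t_covering := by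
  intro n k t _ _
  unfold Spec_greedy_t_covering greedy_t_covering greedy_t_covering_alt
  simp only [pvComb_eq]
  have hrng : (PySem.List.pyRange 0 n).Pairwise (· < ·) := PySem.List.pairwise_lt_pyRange_one 0 n
  refine pv_loop_eq _ t.toNat ?_
    ((PySem.List.combinations (PySem.List.pyRange 0 n) t.toNat).length + 1) _
    (by omega) (pv_comb_sorted _ _ hrng) ?_ []
  · intro ks hks
    exact pv_comb_mem_sorted hrng hks
  intro ts hts
  have := (PySem.List.mem_combinations_iff _ _ _).mp hts
  exact ⟨List.Pairwise.sublist this.1 hrng, this.2⟩
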